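-- pv_equiv track=rewrite | github.com/Uncle-Samvel/algorithms | 11.py | neighbour
-- ===== SOURCE A (Python) =====
-- def neighbour(x, y, data):
--     Neighbour = 0
--     for example in data:
--         if abs(x - example[0]) == 1 and y == example[1]:
--             Neighbour += 1
--         elif abs(y - example[1]) == 1 and x == example[0]:
--             Neighbour += 1
--     return Neighbour
-- ===== SOURCE B (Python) =====
-- def neighbour(x, y, data):
--     cnt = {}
--     for e in data:
--         k = (e[0], e[1])
--         cnt[k] = cnt.get(k, 0) + 1
--     return (cnt.get((x + 1, y), 0) + cnt.get((x - 1, y), 0)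
--             + cnt.get((x, y + 1), 0) + cnt.get((x, y - 1), 0))
-- ===== Notes on version B (the rewrite author's own statement) =====
-- stated objective: alternative
-- what changed: Builds a coordinate-count dictionary in one pass and returns the sum of the counts at the four fixed neighbour positions, instead of testing each point against abs-difference branch conditions.
import Mathlib
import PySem

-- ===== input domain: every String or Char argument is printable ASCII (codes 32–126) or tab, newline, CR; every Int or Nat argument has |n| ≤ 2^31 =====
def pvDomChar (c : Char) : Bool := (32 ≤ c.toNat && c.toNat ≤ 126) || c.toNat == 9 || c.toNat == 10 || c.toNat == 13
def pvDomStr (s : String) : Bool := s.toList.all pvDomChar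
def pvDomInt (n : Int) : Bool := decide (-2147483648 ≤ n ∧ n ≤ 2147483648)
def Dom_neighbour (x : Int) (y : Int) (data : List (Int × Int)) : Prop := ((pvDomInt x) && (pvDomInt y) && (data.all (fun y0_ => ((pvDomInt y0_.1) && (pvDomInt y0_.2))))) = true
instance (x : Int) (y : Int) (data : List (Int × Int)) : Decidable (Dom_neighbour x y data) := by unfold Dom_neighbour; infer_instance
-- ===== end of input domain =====

-- B builds a coordinate-count dictionary once and sums the counts at the four
-- neighbour positions, instead of A's per-point abs-difference branch tests.

-- ===== PORT A =====
def neighbour (x : Int) (y : Int) (data : List (Int × Int)) : Int :=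
  data.foldl (fun n e =>
    if |x - e.1| = 1 ∧ y = e.2 then n + 1
    else if |y - e.2| = 1 ∧ x = e.1 then n + 1
    else n) 0

-- ===== PORT B =====
def neighbour_alt (x : Int) (y : Int) (data : List (Int × Int)) : Int :=
  let cnt : PySem.Dict (Int × Int) Int :=
    data.foldl (fun d e => d.insert (e.1, e.2) (d.getD (e.1, e.2) 0 + 1)) PySem.Dict.empty
  cnt.getD (x + 1, y) 0 + cnt.getD (x - 1, y) 0 + cnt.getD (x, y + 1) 0 + cnt.getD (x, y - 1) 0

-- ===== PRECONDITION & SPEC =====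
def Spec_neighbour (x : Int) (y : Int) (data : List (Int × Int)) (out : Int) : Prop := out = neighbour_alt x y data
instance (x : Int) (y : Int) (data : List (Int × Int)) (out : Int) : Decidable (Spec_neighbour x y data out) := by unfold Spec_neighbour; infer_instance

-- ===== CLAIM (what is proved, stated in full; the proofs are below) =====
def Claim_equal_neighbour : Prop := ∀ (x : Int) (y : Int) (data : List (Int × Int)), Dom_neighbour x y data → Spec_neighbour x y data (neighbour x y data)

-- ===== LEMMAS AND PROOFS =====

-- A's fold, started from accumulator n, is n plus the four neighbour counts.
lemma neighbour_foldl_counts (x y : Int) (data : List (Int × Int)) : ∀ n : Int,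
    data.foldl (fun n e =>
      if |x - e.1| = 1 ∧ y = e.2 then n + 1
      else if |y - e.2| = 1 ∧ x = e.1 then n + 1
      else n) n
    = n + ((data.count (x + 1, y) : Int) + (data.count (x - 1, y) : Int)
         + (data.count (x, y + 1) : Int) + (data.count (x, y - 1) : Int)) := by
  have habs : ∀ u : Int, |u| = 1 ↔ u = 1 ∨ u = -1 := by
    intro u; rw [abs_eq (by norm_num : (0:Int) ≤ 1)]
  induction data with
  | nil => intro n; simp
  | cons e t ih =>
    intro n
    obtain ⟨a, b⟩ := e
    rw [List.foldl_cons, ih]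
    simp only [List.count_cons, Prod.mk.injEq, beq_iff_eq, habs]
    push_cast
    split_ifs <;> omega

-- B's dictionary lookup at any key is the count of that coordinate in data.
lemma neighbour_alt_getD (data : List (Int × Int)) (k : Int × Int) :
    (data.foldl (fun d e => d.insert (e.1, e.2) (d.getD (e.1, e.2) 0 + 1))
      (PySem.Dict.empty : PySem.Dict (Int × Int) Int)).getD k 0 = (data.count k : Int) := by
  have h := PySem.Dict.getD_foldl_insert_add_one (l := data) (d := (PySem.Dict.empty : PySem.Dict (Int × Int) Int)) (v := k)
  simpa [PySem.Dict.getD_empty] using h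

-- ===== VERDICT (by name: the statement is the Claim_ definition above) =====
theorem neighbour_spec : Claim_equal_neighbour := by
  intro x y data _
  unfold Spec_neighbour neighbour neighbour_alt
  rw [neighbour_foldl_counts]
  simp only [neighbour_alt_getD]
  ring
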